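-- pv_equiv track=rewrite | github.com/airly0201/DataLinkAnalyzer-Flet | core/excel_reader.py | _handle_duplicate_headers
-- ===== SOURCE A (Python) =====
-- from typing import List, Dict, Any, Optional
--
-- def _handle_duplicate_headers(headers: List[str]) -> List[str]:
--     """处理重复的列名"""
--     seen = {}
--     result = []
--
--     for h in headers:
--         if h in seen:
--             seen[h] += 1
--             result.append(f"{h}_{seen[h]}")
--         else:
--             seen[h] = 0
--             result.append(h)
--
--     return result
-- ===== SOURCE B (Python) =====
-- from typing import List
--
-- def _handle_duplicate_headers(headers: List[str]) -> List[str]: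
--     """Two-phase: group occurrence indices per header, then scatter names by rank."""
--     positions = {}
--     for i, h in enumerate(headers):
--         positions.setdefault(h, []).append(i)
--     result = [None] * len(headers)
--     for h, idxs in positions.items():
--         for k, i in enumerate(idxs):
--             result[i] = h if k == 0 else f"{h}_{k}"
--     return result
-- ===== Notes on version B (the rewrite author's own statement) =====
-- stated objective: alternative
-- what changed: A disambiguates in a single forward pass with a running per-header counter dict; B first builds a dict mapping each header to the ordered list of its occurrence indices and then scatters the renamed values into a preallocated result list by position.
import Mathlib
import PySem

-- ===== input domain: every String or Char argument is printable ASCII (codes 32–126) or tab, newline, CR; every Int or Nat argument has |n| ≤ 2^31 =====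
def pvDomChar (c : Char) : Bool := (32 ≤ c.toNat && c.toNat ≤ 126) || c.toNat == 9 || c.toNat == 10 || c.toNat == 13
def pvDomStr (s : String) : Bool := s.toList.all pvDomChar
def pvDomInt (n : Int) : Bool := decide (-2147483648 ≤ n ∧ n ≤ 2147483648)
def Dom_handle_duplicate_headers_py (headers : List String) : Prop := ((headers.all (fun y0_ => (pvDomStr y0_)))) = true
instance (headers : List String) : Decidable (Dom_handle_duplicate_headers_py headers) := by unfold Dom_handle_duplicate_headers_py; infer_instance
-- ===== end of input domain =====

-- B replaces A's single counting pass by a two-phase group-then-scatter (index dict, writes by position); objective: alternative decomposition, same cost.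

-- ===== PORT A =====
-- literal transliteration of A: one forward pass, 'seen' counts prior occurrences, result appended
def handle_duplicate_headers_py (headers : List String) : List String :=
  (headers.foldl
    (fun (st : PySem.Dict String Int × List String) h =>
      if st.1.contains h then
        let seen := st.1.modify h 0 (· + 1)       -- seen[h] += 1
        (seen, st.2 ++ [h ++ "_" ++ PySem.Int.toStr (seen.getD h 0)])
      else
        (st.1.insert h 0, st.2 ++ [h]))
    (PySem.Dict.empty, [])).2

-- ===== PORT B =====
-- transliteration of Source B: build positions[h] = list of indices (setdefault+append = Dict.modify),
-- then scatter names into a preallocated result by index.  [None]*n is ported as replicate "" :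
-- every slot is provably overwritten, so the placeholder value never survives.
def handle_duplicate_headers_py_alt (headers : List String) : List String :=
  let positions : PySem.Dict String (List Int) :=
    (PySem.List.enumerate headers).foldl
      (fun d p => d.modify p.2 [] (· ++ [p.1])) PySem.Dict.empty
  let result : List String := List.replicate headers.length ""
  positions.items.foldl
    (fun r hp =>
      (PySem.List.enumerate hp.2).foldl
        (fun r q => PySem.List.pySetD r q.2
          (if q.1 = 0 then hp.1 else hp.1 ++ "_" ++ PySem.Int.toStr q.1)) r)
    result

-- ===== PRECONDITION & SPEC =====
def Spec_handle_duplicate_headers_py (headers : List String) (out : List String) : Prop := out = handle_duplicate_headers_py_alt headers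
instance (headers : List String) (out : List String) : Decidable (Spec_handle_duplicate_headers_py headers out) := by unfold Spec_handle_duplicate_headers_py; infer_instance

-- ===== CLAIM (what is proved, stated in full; the proofs are below) =====
def Claim_equal_handle_duplicate_headers_py : Prop := ∀ (headers : List String), Dom_handle_duplicate_headers_py headers → Spec_handle_duplicate_headers_py headers (handle_duplicate_headers_py headers)

-- ===== LEMMAS AND PROOFS =====

-- the name position j receives: bare header for the first occurrence, h_c for the c-th duplicate
def pvTag (h : String) (c : Nat) : String :=
  if c = 0 then h else h ++ "_" ++ PySem.Int.toStr (c : Int)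

-- canonical result of A's pass, with the already-processed prefix made explicit
def pvCanon (pre rest : List String) : List String :=
  match rest with
  | [] => []
  | h :: t => pvTag h (pre.count h) :: pvCanon (pre ++ [h]) t

-- occurrence-index list of h in l, indices starting at s (what positions[h] holds in B)
def pvOcc (s : Int) (l : List String) (h : String) : List Int :=
  ((PySem.List.enumerate l s).filter (fun p => p.2 == h)).map (·.1)

lemma pvCanon_length (pre rest : List String) : (pvCanon pre rest).length = rest.length := by
  induction rest generalizing pre with
  | nil => rfl
  | cons h t ih => simp [pvCanon, ih]

lemma pvCanon_getElem (pre rest : List String) (j : Nat) (hj : j < rest.length) :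
    (pvCanon pre rest)[j]'(by rw [pvCanon_length]; exact hj) =
      pvTag (rest[j]) ((pre ++ rest.take j).count rest[j]) := by
  induction rest generalizing pre j with
  | nil => simp at hj
  | cons h t ih =>
    cases j with
    | zero => simp [pvCanon]
    | succ j =>
      have hj' : j < t.length := by simpa using hj
      simp only [pvCanon, List.getElem_cons_succ, List.take_succ_cons]
      rw [ih (pre ++ [h]) j hj']
      simp

lemma pvCount_app_ne {x h : String} (pre : List String) (hxh : x ≠ h) :
    List.count x (pre ++ [h]) = List.count x pre := by
  have h0 : List.count x [h] = 0 := List.count_eq_zero.mpr (by simp [hxh])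
  rw [List.count_append, h0, Nat.add_zero]

lemma pvCount_app_self (h : String) (pre : List String) :
    List.count h (pre ++ [h]) = List.count h pre + 1 := by
  simp [List.count_append]

lemma pvA_loop (rest pre : List String) (seen : PySem.Dict String Int) (acc : List String)
    (hc : ∀ h, seen.contains h = decide (0 < pre.count h))
    (hg : ∀ h, 0 < pre.count h → seen.getD h 0 = (pre.count h : Int) - 1) :
    (rest.foldl
      (fun (st : PySem.Dict String Int × List String) h =>
        if st.1.contains h then
          let seen := st.1.modify h 0 (· + 1)
          (seen, st.2 ++ [h ++ "_" ++ PySem.Int.toStr (seen.getD h 0)])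
        else
          (st.1.insert h 0, st.2 ++ [h]))
      (seen, acc)).2 = acc ++ pvCanon pre rest := by
  induction rest generalizing pre seen acc with
  | nil => simp [pvCanon]
  | cons h t ih =>
    by_cases hpos : 0 < pre.count h
    · have hcontains : seen.contains h = true := by rw [hc]; simpa using hpos
      have hgd : (seen.modify h 0 (· + 1)).getD h 0 = (pre.count h : Int) := by
        rw [PySem.Dict.getD_modify_self, hg h hpos]; ring
      simp only [List.foldl_cons, hcontains, if_true]
      rw [ih (pre ++ [h])]
      · have htag : pvTag h (pre.count h) = h ++ "_" ++ PySem.Int.toStr (pre.count h : Int) := by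
          simp [pvTag, Nat.pos_iff_ne_zero.mp hpos]
        simp [pvCanon, htag, hgd]
      · intro x
        rw [PySem.Dict.contains_modify, hc]
        by_cases hx : x = h
        · subst hx; simp [hpos]
        · simp [pvCount_app_ne pre hx, hx]
      · intro x hx
        by_cases hxh : x = h
        · subst hxh
          rw [hgd, pvCount_app_self]
          push_cast; ring
        · have hx' : 0 < List.count x pre := by rwa [pvCount_app_ne pre hxh] at hx
          rw [PySem.Dict.getD_modify_of_ne _ _ _ hxh, pvCount_app_ne pre hxh]
          exact hg x hx'
    · have hcontains : seen.contains h = false := by rw [hc]; simpa using hpos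
      simp only [List.foldl_cons, hcontains, if_false, Bool.false_eq_true]
      rw [ih (pre ++ [h])]
      · have htag : pvTag h (pre.count h) = h := by
          simp [pvTag, Nat.eq_zero_of_not_pos hpos]
        simp [pvCanon, htag]
      · intro x
        rw [PySem.Dict.contains_insert, hc]
        by_cases hx : x = h
        · subst hx; simp
        · simp [pvCount_app_ne pre hx, hx]
      · intro x hx
        by_cases hxh : x = h
        · subst hxh
          rw [PySem.Dict.getD_insert_self, pvCount_app_self,
            Nat.eq_zero_of_not_pos hpos]
          simp
        · have hx' : 0 < List.count x pre := by rwa [pvCount_app_ne pre hxh] at hx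
          rw [PySem.Dict.getD_insert_of_ne _ _ _ hxh, pvCount_app_ne pre hxh]
          exact hg x hx'

lemma pvOcc_cons (s : Int) (x : String) (t : List String) (h : String) :
    pvOcc s (x :: t) h = (if x = h then [s] else []) ++ pvOcc (s+1) t h := by
  by_cases hx : x = h <;>
    simp [pvOcc, PySem.List.enumerate_cons, hx]

lemma pvMem_occ (s : Int) (l : List String) (h : String) (x : Int) :
    x ∈ pvOcc s l h ↔ ∃ (i : Nat), ∃ (hi : i < l.length), x = s + i ∧ l[i] = h := by
  simp only [pvOcc, List.mem_map, List.mem_filter, PySem.List.mem_enumerate_iff]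
  constructor
  · rintro ⟨p, ⟨⟨k, hk, rfl⟩, hph⟩, rfl⟩
    exact ⟨k, hk, rfl, by simpa using hph⟩
  · rintro ⟨i, hi, rfl, hh⟩
    exact ⟨(s + i, l[i]), ⟨⟨i, hi, rfl⟩, by simpa using hh⟩, rfl⟩

lemma pvOcc_spec (l : List String) (h : String) (s : Int) (k : Nat)
    (hk : k < (pvOcc s l h).length) :
    ∃ (i : Nat) (hi : i < l.length),
      (pvOcc s l h)[k]? = some (s + i) ∧ l[i] = h ∧ (l.take i).count h = k := by
  induction l generalizing s k with
  | nil => simp [pvOcc, PySem.List.enumerate_nil] at hk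
  | cons x t ih =>
    by_cases hx : x = h
    · subst hx
      rw [pvOcc_cons] at hk ⊢
      rw [if_pos rfl, List.singleton_append] at hk ⊢
      cases k with
      | zero => exact ⟨0, by simp, by simp, by simp, by simp⟩
      | succ k =>
        have hk' : k < (pvOcc (s+1) t x).length := by simpa using hk
        obtain ⟨i, hi, hget, hih, hcnt⟩ := ih (s+1) k hk'
        refine ⟨i+1, by simpa using hi, ?_, by simpa using hih, ?_⟩
        · rw [List.getElem?_cons_succ, hget]
          congr 1
          push_cast; ring
        · simp [List.take_succ_cons, hcnt]
    · rw [pvOcc_cons] at hk ⊢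
      simp only [if_neg hx, List.nil_append] at hk ⊢
      obtain ⟨i, hi, hget, hih, hcnt⟩ := ih (s+1) k hk
      refine ⟨i+1, by simpa using hi, ?_, by simpa using hih, ?_⟩
      · rw [hget]
        congr 1
        push_cast; ring
      · have hhx : ¬ (h = x) := fun hh => hx hh.symm
        simp [List.take_succ_cons, hcnt, hx]

lemma pvOcc_rank (l : List String) (j : Nat) (h : String) (hjh : l[j]? = some h) :
    (pvOcc 0 l h)[(l.take j).count h]? = some (j : Int) := by
  obtain ⟨hj, hjh'⟩ := List.getElem?_eq_some_iff.mp hjh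
  have hmem : (j : Int) ∈ pvOcc 0 l h :=
    (pvMem_occ 0 l _ _).mpr ⟨j, hj, by simp, hjh'⟩
  obtain ⟨k, hk, hget⟩ := List.mem_iff_getElem.mp hmem
  obtain ⟨i, hi, hget', hih, hcnt⟩ := pvOcc_spec l h 0 k hk
  have hgetk : (pvOcc 0 l h)[k]? = some (j : Int) := by
    rw [List.getElem?_eq_getElem hk, hget]
  have hij : i = j := by
    rw [hget'] at hgetk
    have : ((i : Int)) = (j : Int) := by simpa using (Option.some_injective _ hgetk)
    exact_mod_cast this
  subst hij
  rw [hcnt]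
  exact hgetk

lemma pvFoldSet_keep (ws : List (Int × String)) (r : List String) (j : Nat) (v : String)
    (h0 : ∀ p ∈ ws, 0 ≤ p.1)
    (h : ∀ p ∈ ws, p.1 = (j : Int) → p.2 = v)
    (hstart : r[j]? = some v) :
    (ws.foldl (fun r p => PySem.List.pySetD r p.1 p.2) r)[j]? = some v := by
  induction ws generalizing r with
  | nil => exact hstart
  | cons p t ih =>
    simp only [List.foldl_cons]
    refine ih _ (fun q hq => h0 q (List.mem_cons_of_mem _ hq)) (fun q hq => h q (List.mem_cons_of_mem _ hq)) ?_
    rw [PySem.List.pySetD_of_nonneg _ _ (h0 p (by simp))]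
    by_cases hp : p.1 = (j : Int)
    · rw [h p (by simp) hp]
      have : p.1.toNat = j := by omega
      rw [this]
      rw [List.getElem?_set_self', hstart]
      rfl
    · have hp0 : 0 ≤ p.1 := h0 p (by simp)
      rw [List.getElem?_set_ne (by omega)]
      exact hstart

lemma pvFoldSet_main (ws : List (Int × String)) (r : List String) (j : Nat) (v : String)
    (h0 : ∀ p ∈ ws, 0 ≤ p.1)
    (hmem : ((j : Int), v) ∈ ws)
    (h : ∀ p ∈ ws, p.1 = (j : Int) → p.2 = v)
    (hj : j < r.length) :
    (ws.foldl (fun r p => PySem.List.pySetD r p.1 p.2) r)[j]? = some v := by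
  induction ws generalizing r with
  | nil => simp at hmem
  | cons p t ih =>
    simp only [List.foldl_cons]
    by_cases hp : p.1 = (j : Int)
    · have hpv : p.2 = v := h p (by simp) hp
      have hset : (PySem.List.pySetD r p.1 p.2)[j]? = some v := by
        rw [PySem.List.pySetD_of_nonneg _ _ (h0 p (by simp)), hpv]
        have : p.1.toNat = j := by omega
        rw [this, List.getElem?_set_self']
        simp [List.getElem?_eq_getElem hj]
      exact pvFoldSet_keep t _ j v (fun q hq => h0 q (List.mem_cons_of_mem _ hq))
        (fun q hq => h q (List.mem_cons_of_mem _ hq)) hset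
    · rcases List.mem_cons.mp hmem with heq | hmem'
      · exact absurd (by rw [← heq]) hp
      · refine ih _ (fun q hq => h0 q (List.mem_cons_of_mem _ hq)) hmem'
          (fun q hq => h q (List.mem_cons_of_mem _ hq)) ?_
        rw [PySem.List.pySetD_of_nonneg _ _ (h0 p (by simp))]
        simpa using hj

lemma pvB_positions_getD (headers : List String) (h : String) :
    ((PySem.List.enumerate headers).foldl
      (fun d (p : Int × String) => d.modify p.2 [] (· ++ [p.1])) PySem.Dict.empty).getD h []
      = pvOcc 0 headers h := by
  have hsw : (PySem.List.enumerate headers).foldl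
      (fun d (p : Int × String) => d.modify p.2 [] (· ++ [p.1])) PySem.Dict.empty
      = ((PySem.List.enumerate headers).map (fun p => (p.2, p.1))).foldl
        (fun d (p : String × Int) => d.modify p.1 [] (· ++ [p.2])) PySem.Dict.empty := by
    rw [List.foldl_map]
  rw [hsw, PySem.Dict.getD_foldl_modify_append]
  simp [pvOcc, List.filter_map, List.map_map, Function.comp_def]

lemma pvB_keys_nodup (headers : List String) :
    ((PySem.List.enumerate headers).foldl
      (fun d (p : Int × String) => d.modify p.2 [] (· ++ [p.1])) PySem.Dict.empty).keys.Nodup := by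
  exact PySem.Dict.nodup_keys_foldl_modify_key (PySem.List.enumerate headers)
    (fun (p : Int × String) => p.2) ([] : List Int)
    (fun (_ : PySem.Dict String (List Int)) (p : Int × String) => (fun v => v ++ [p.1]))
    PySem.Dict.empty (by rw [PySem.Dict.keys_empty]; exact List.nodup_nil)

lemma pvB_keys (headers : List String) :
    ((PySem.List.enumerate headers).foldl
      (fun d (p : Int × String) => d.modify p.2 [] (· ++ [p.1])) PySem.Dict.empty).keys
      = PySem.Set.ofList headers := by
  rw [PySem.Dict.keys_foldl_modify_key (PySem.List.enumerate headers)
    (fun (p : Int × String) => p.2) ([] : List Int)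
    (fun (_ : PySem.Dict String (List Int)) (p : Int × String) => (fun v => v ++ [p.1]))
    PySem.Dict.empty]
  rw [PySem.List.map_snd_enumerate, PySem.Dict.keys_empty]
  simp [PySem.Set.update, PySem.Set.ofList_eq_foldl]

lemma pvB_items (headers : List String) :
    ((PySem.List.enumerate headers).foldl
      (fun d (p : Int × String) => d.modify p.2 [] (· ++ [p.1])) PySem.Dict.empty).items
      = (PySem.Set.ofList headers).map (fun k => (k, pvOcc 0 headers k)) := by
  rw [PySem.Dict.items_eq_map_keys _ (pvB_keys_nodup headers) []]
  rw [pvB_keys]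
  exact List.map_congr_left (fun k _ => by rw [pvB_positions_getD])


lemma pvFoldSet_length (ws : List (Int × String)) (r : List String) :
    (ws.foldl (fun r p => PySem.List.pySetD r p.1 p.2) r).length = r.length := by
  induction ws generalizing r with
  | nil => rfl
  | cons p t ih => simp [ih, PySem.List.length_pySetD]

lemma pvA_eq_canon (headers : List String) :
    handle_duplicate_headers_py headers = pvCanon [] headers := by
  unfold handle_duplicate_headers_py
  rw [pvA_loop headers [] PySem.Dict.empty []]
  · simp
  · intro h; simp [PySem.Dict.contains_empty]
  · intro h hh; simp at hh

lemma pvB_eq_canon (headers : List String) :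
    handle_duplicate_headers_py_alt headers = pvCanon [] headers := by
  have hres : handle_duplicate_headers_py_alt headers
      = ((PySem.Set.ofList headers).flatMap (fun k =>
          (PySem.List.enumerate (pvOcc 0 headers k)).map
            (fun q => ((q.2 : Int), if q.1 = 0 then k else k ++ "_" ++ PySem.Int.toStr q.1)))).foldl
          (fun r p => PySem.List.pySetD r p.1 p.2)
          (List.replicate headers.length "") := by
    unfold handle_duplicate_headers_py_alt
    dsimp only
    rw [pvB_items, List.foldl_map, List.foldl_flatMap]
    simp only [List.foldl_map]
  rw [hres]
  apply List.ext_getElem?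
  intro j
  by_cases hj : j < headers.length
  · have hh0 : headers[j]? = some headers[j] := List.getElem?_eq_getElem hj
    have hjel : headers[j] = headers[j] := rfl
    -- notation
    have hrank := pvOcc_rank headers j headers[j] hh0
    obtain ⟨hkl, hkeq⟩ := List.getElem?_eq_some_iff.mp hrank
    have hv := pvFoldSet_main
      ((PySem.Set.ofList headers).flatMap (fun k =>
        (PySem.List.enumerate (pvOcc 0 headers k)).map
          (fun q => ((q.2 : Int), if q.1 = 0 then k else k ++ "_" ++ PySem.Int.toStr q.1))))
      (List.replicate headers.length "") j
      (pvTag headers[j] ((headers.take j).count headers[j]))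
      ?_ ?_ ?_ (by simpa using hj)
    · rw [hv]
      have hclen : j < (pvCanon [] headers).length := by rw [pvCanon_length]; exact hj
      rw [List.getElem?_eq_getElem hclen]
      congr 1
      rw [pvCanon_getElem [] headers j hj]
      simp
    -- nonneg
    · intro p hp
      obtain ⟨k, hk, hpm⟩ := List.mem_flatMap.mp hp
      obtain ⟨q, hq, rfl⟩ := List.mem_map.mp hpm
      obtain ⟨m, hm, rfl⟩ := (PySem.List.mem_enumerate_iff _ _ _).mp hq
      have : (pvOcc 0 headers k)[m] ∈ pvOcc 0 headers k := List.getElem_mem hm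
      obtain ⟨i, hi, hxe, _⟩ := (pvMem_occ _ _ _ _).mp this
      simp only
      rw [hxe]
      omega
    -- membership
    · refine List.mem_flatMap.mpr ⟨headers[j], PySem.Set.mem_ofList headers _ |>.mpr (List.getElem_mem hj), ?_⟩
      refine List.mem_map.mpr ⟨((0 : Int) + ((headers.take j).count headers[j] : Nat), (j : Int)), ?_, ?_⟩
      · exact (PySem.List.mem_enumerate_iff _ _ _).mpr ⟨_, hkl, by rw [hkeq]⟩
      · by_cases hk0 : (headers.take j).count headers[j] = 0 <;>
          simp [pvTag, hk0]
    -- uniqueness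
    · intro p hp hpj
      obtain ⟨k, hk, hpm⟩ := List.mem_flatMap.mp hp
      obtain ⟨q, hq, rfl⟩ := List.mem_map.mp hpm
      obtain ⟨m, hm, rfl⟩ := (PySem.List.mem_enumerate_iff _ _ _).mp hq
      simp only at hpj
      obtain ⟨i, hi, hocc, hik, hcnt⟩ := pvOcc_spec headers k 0 m hm
      rw [List.getElem?_eq_getElem hm, hpj] at hocc
      have hij : i = j := by
        have : ((j : Int)) = 0 + (i : Int) := Option.some_injective _ hocc
        omega
      subst hij
      rw [hik, hcnt]
      by_cases hm0 : m = 0 <;> simp [pvTag, hm0]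
  · rw [List.getElem?_eq_none (by rw [pvFoldSet_length]; simpa using Nat.le_of_not_lt hj),
      List.getElem?_eq_none (by rw [pvCanon_length]; omega)]


-- ===== VERDICT (by name: the statement is the Claim_ definition above) =====
theorem handle_duplicate_headers_py_spec : Claim_equal_handle_duplicate_headers_py := by
  intro headers _
  unfold Spec_handle_duplicate_headers_py
  rw [pvA_eq_canon, pvB_eq_canon]
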